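-- pv_equiv track=rewrite | github.com/akurtle/InterviewAI | backend/app/analysis/speech_feedback.py | _count_fillers
-- ===== SOURCE A (Python) =====
-- from typing import Any, Dict, Iterable, List, Optional, Tuple
--
-- FILLER_WORDS = {
--     "um",
--     "uh",
--     "erm",
--     "like",
--     "actually",
--     "basically",
--     "literally",
--     "well",
--     "so",
--     "right",
--     "okay",
--     "ok",
-- }
--
-- FILLER_PHRASES = {
--     ("you", "know"),
--     ("kind", "of"),
--     ("sort", "of"),
-- }
--
-- def _count_fillers(tokens: List[str]) -> int:
--     filler_count = 0
--     for token in tokens: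
--         if token in FILLER_WORDS:
--             filler_count += 1
--     if len(tokens) >= 2:
--         for i in range(len(tokens) - 1):
--             if (tokens[i], tokens[i + 1]) in FILLER_PHRASES:
--                 filler_count += 1
--     return filler_count
-- ===== SOURCE B (Python) =====
-- FILLER_WORDS = {
--     "um",
--     "uh",
--     "erm",
--     "like",
--     "actually",
--     "basically",
--     "literally",
--     "well",
--     "so",
--     "right",
--     "okay",
--     "ok",
-- }
--
-- FILLER_PHRASES = {
--     ("you", "know"),
--     ("kind", "of"),
--     ("sort", "of"),
-- }
--
-- def _count_fillers(tokens):
--     # Frequency-table strategy: build histograms of tokens and of adjacent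
--     # bigrams once, then the answer is the sum of the table entries for the
--     # fixed filler keys.  No per-token membership tests against the filler
--     # sets at all: the loops over the data only count, and the final sums
--     # iterate over the (constant-size) filler sets instead of the input.
--     freq = {}
--     for t in tokens:
--         freq[t] = freq.get(t, 0) + 1
--     bifreq = {}
--     for pair in zip(tokens, tokens[1:]):
--         bifreq[pair] = bifreq.get(pair, 0) + 1
--     total = 0
--     for w in FILLER_WORDS:
--         total += freq.get(w, 0)
--     for p in FILLER_PHRASES:
--         total += bifreq.get(p, 0)
--     return total
-- ===== Notes on version B (the rewrite author's own statement) =====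
-- stated objective: alternative
-- what changed: A tests every token (and every adjacent pair) for membership in the filler sets; B instead builds token and bigram frequency tables in counting passes with no membership tests and then sums the table entries for the fixed filler keys, iterating over the constant-size filler sets rather than the input.
import Mathlib
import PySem

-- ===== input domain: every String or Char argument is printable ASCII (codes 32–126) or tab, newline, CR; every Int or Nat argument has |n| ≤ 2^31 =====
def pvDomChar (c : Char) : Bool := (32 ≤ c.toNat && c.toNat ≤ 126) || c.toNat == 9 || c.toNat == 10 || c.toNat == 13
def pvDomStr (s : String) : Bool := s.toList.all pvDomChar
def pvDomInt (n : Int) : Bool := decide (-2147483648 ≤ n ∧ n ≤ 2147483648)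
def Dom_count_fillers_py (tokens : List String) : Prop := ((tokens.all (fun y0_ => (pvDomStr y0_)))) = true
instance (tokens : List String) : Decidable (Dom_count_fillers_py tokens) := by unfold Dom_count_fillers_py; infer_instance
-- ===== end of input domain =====

-- B replaces A's per-token membership tests by frequency tables (token and bigram histograms)
-- summed over the fixed filler keys; return values proved equal on all inputs.

def fillerWords : PySem.Set String :=
  PySem.Set.ofList ["um", "uh", "erm", "like", "actually", "basically", "literally",
                    "well", "so", "right", "okay", "ok"]

def fillerPhrases : PySem.Set (String × String) :=
  PySem.Set.ofList [("you", "know"), ("kind", "of"), ("sort", "of")]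

-- ===== PORT A =====
def count_fillers_py (tokens : List String) : Int :=
  let fc : Int := tokens.foldl
    (fun acc token => if PySem.Set.contains fillerWords token then acc + 1 else acc) 0
  if 2 ≤ PySem.List.len tokens then
    (PySem.List.pyRange 0 (PySem.List.len tokens - 1) 1).foldl
      (fun acc i =>
        if PySem.Set.contains fillerPhrases
            (PySem.List.pyGetD tokens i "", PySem.List.pyGetD tokens (i + 1) "")
        then acc + 1 else acc) fc
  else fc

-- ===== PORT B =====
-- freq[t] = freq.get(t, 0) + 1 loops; zip(tokens, tokens[1:]); then sums over the filler sets.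
def count_fillers_py_alt (tokens : List String) : Int :=
  let freq : PySem.Dict String Int :=
    tokens.foldl (fun d t => d.insert t (d.getD t 0 + 1)) PySem.Dict.empty
  let bifreq : PySem.Dict (String × String) Int :=
    (tokens.zip (PySem.List.slice tokens (some 1) none)).foldl
      (fun d p => d.insert p (d.getD p 0 + 1)) PySem.Dict.empty
  let total : Int := fillerWords.foldl (fun acc w => acc + freq.getD w 0) 0
  fillerPhrases.foldl (fun acc p => acc + bifreq.getD p 0) total

-- ===== PRECONDITION & SPEC =====
def Spec_count_fillers_py (tokens : List String) (out : Int) : Prop := out = count_fillers_py_alt tokens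
instance (tokens : List String) (out : Int) : Decidable (Spec_count_fillers_py tokens out) := by unfold Spec_count_fillers_py; infer_instance

-- ===== CLAIM (what is proved, stated in full; the proofs are below) =====
def Claim_equal_count_fillers_py : Prop := ∀ (tokens : List String), Dom_count_fillers_py tokens → Spec_count_fillers_py tokens (count_fillers_py tokens)

-- ===== LEMMAS AND PROOFS =====

-- reference counts used only by the proofs
def refS : List String → Int
  | [] => 0
  | t :: r => (if PySem.Set.contains fillerWords t then 1 else 0) + refS r

def refP : List String → Int
  | [] => 0
  | [_] => 0
  | a :: b :: r => (if PySem.Set.contains fillerPhrases (a, b) then 1 else 0) + refP (b :: r)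

theorem singles_fold (ts : List String) (c : Int) :
    ts.foldl (fun acc token => if PySem.Set.contains fillerWords token then acc + 1 else acc) c
      = c + refS ts := by
  induction ts generalizing c with
  | nil => simp [refS]
  | cons a r ih => simp only [List.foldl_cons, refS, ih]; split_ifs <;> ring

theorem pyGetD_cons_succ (x : String) (xs : List String) (k : Int) (hk : 0 ≤ k) (d : String) :
    PySem.List.pyGetD (x :: xs) (k + 1) d = PySem.List.pyGetD xs k d := by
  obtain ⟨m, rfl⟩ := Int.eq_ofNat_of_zero_le hk
  have h : (m : Int) + 1 = ((m + 1 : Nat) : Int) := by push_cast; ring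
  rw [h, PySem.List.pyGetD_natCast, PySem.List.pyGetD_natCast]
  simp [List.getD]

theorem pair_fold (ts : List String) (a : String) (c : Int) :
    (PySem.List.pyRange 0 (ts.length : Int) 1).foldl
      (fun acc i =>
        if PySem.Set.contains fillerPhrases
            (PySem.List.pyGetD (a :: ts) i "", PySem.List.pyGetD (a :: ts) (i + 1) "")
        then acc + 1 else acc) c
      = c + refP (a :: ts) := by
  induction ts generalizing a c with
  | nil => simp [PySem.List.pyRange_one_eq_nil, refP]
  | cons b r ih =>
      have hcons : PySem.List.pyRange 0 ((b :: r).length : Int) 1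
          = 0 :: PySem.List.pyRange 1 ((b :: r).length : Int) 1 := by
        apply PySem.List.pyRange_one_cons
        simp
      rw [hcons, List.foldl_cons]
      have h0 : PySem.List.pyGetD (a :: b :: r) 0 "" = a :=
        PySem.List.pyGetD_zero_cons _ _ _
      have h1 : PySem.List.pyGetD (a :: b :: r) (0 + 1) "" = b := by
        rw [pyGetD_cons_succ a (b :: r) 0 le_rfl ""]
        exact PySem.List.pyGetD_zero_cons _ _ _
      rw [h0, h1]
      have hshift : PySem.List.pyRange 1 ((b :: r).length : Int) 1
          = (PySem.List.pyRange 0 (r.length : Int) 1).map (fun k => k + 1) := by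
        simp only [PySem.List.pyRange_one, List.map_map]
        have he : ((b :: r).length : Int) - 1 = (r.length : Int) - 0 := by simp
        rw [he]
        apply List.map_congr_left
        intro k _
        simp
        ring
      rw [hshift, List.foldl_map]
      have hcongr := PySem.List.foldl_congr_mem
        (l := PySem.List.pyRange 0 (r.length : Int) 1)
        (init := if PySem.Set.contains fillerPhrases (a, b) then c + 1 else c)
        (f := fun acc k =>
          if PySem.Set.contains fillerPhrases
              (PySem.List.pyGetD (a :: b :: r) (k + 1) "",
               PySem.List.pyGetD (a :: b :: r) (k + 1 + 1) "")
          then acc + 1 else acc)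
        (g := fun acc k =>
          if PySem.Set.contains fillerPhrases
              (PySem.List.pyGetD (b :: r) k "", PySem.List.pyGetD (b :: r) (k + 1) "")
          then acc + 1 else acc)
        (by
          intro acc k hk
          have hk0 : 0 ≤ k := ((PySem.List.mem_pyRange_one).1 hk).1
          dsimp only
          rw [pyGetD_cons_succ a (b :: r) k hk0, pyGetD_cons_succ a (b :: r) (k + 1) (by omega)])
      rw [hcongr, ih b]
      simp only [refP]
      split_ifs <;> ring

-- B-side: indicator summed over a duplicate-free key list
theorem indicator_sum {α : Type} [BEq α] [LawfulBEq α] (ks : List α) (hnd : ks.Nodup) (x : α) :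
    (ks.map (fun w => if x == w then (1 : Int) else 0)).sum
      = if ks.contains x then 1 else 0 := by
  induction ks with
  | nil => simp
  | cons k ks ih =>
      rcases List.nodup_cons.1 hnd with ⟨hk, hnd'⟩
      rw [List.map_cons, List.sum_cons, ih hnd', List.contains_cons]
      by_cases h : x = k
      · subst h
        simp [hk]
      · simp [h]

-- summing per-key counts over a duplicate-free key list counts the members
theorem sum_count_eq {α : Type} [BEq α] [LawfulBEq α] (ks : List α) (hnd : ks.Nodup)
    (xs : List α) :
    (ks.map (fun w => (xs.count w : Int))).sum
      = xs.foldr (fun x acc => (if ks.contains x then 1 else 0) + acc) 0 := by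
  induction xs with
  | nil => simp
  | cons x xs ih =>
      simp only [List.foldr_cons, ← ih]
      have hcnt : (ks.map (fun w => ((x :: xs).count w : Int)))
          = ks.map (fun w => (if x == w then (1 : Int) else 0) + (xs.count w : Int)) := by
        apply List.map_congr_left
        intro w _
        rw [List.count_cons]
        push_cast
        split_ifs <;> ring
      rw [hcnt, List.sum_map_add, indicator_sum ks hnd x]

theorem refS_eq_foldr (ts : List String) :
    refS ts = ts.foldr
      (fun x acc => (if List.contains fillerWords x then (1 : Int) else 0) + acc) 0 := by
  induction ts with
  | nil => simp [refS]
  | cons t r ih =>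
      simp only [refS, List.foldr_cons, ih, PySem.Set.contains_eq_listContains]
      congr 1

theorem refP_eq_foldr (ts : List String) :
    refP ts = (ts.zip ts.tail).foldr
      (fun p acc => (if List.contains fillerPhrases p then (1 : Int) else 0) + acc) 0 := by
  induction ts with
  | nil => simp [refP]
  | cons a ts ih =>
      cases ts with
      | nil => simp [refP]
      | cons b r =>
          simp only [refP, List.zip_cons_cons, List.foldr_cons, ih,
            PySem.Set.contains_eq_listContains, List.tail]
          congr 1

theorem nodup_fillerWords : fillerWords.Nodup := by decide
theorem nodup_fillerPhrases : fillerPhrases.Nodup := by decide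

theorem count_fillers_py_eq (tokens : List String) :
    count_fillers_py tokens = count_fillers_py_alt tokens := by
  -- A equals refS + refP
  have hA : count_fillers_py tokens = refS tokens + refP tokens := by
    cases tokens with
    | nil => simp [count_fillers_py, refS, refP]
    | cons a ts =>
        cases ts with
        | nil =>
            unfold count_fillers_py
            rw [if_neg (by simp [PySem.List.len_eq])]
            rw [singles_fold]
            simp [refP]
        | cons b r =>
            unfold count_fillers_py
            have hlen : (2 : Int) ≤ PySem.List.len (a :: b :: r) := by
              simp [PySem.List.len_eq]; omega
            rw [if_pos hlen]
            have hlen1 : PySem.List.len (a :: b :: r) - 1 = ((b :: r).length : Int) := by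
              simp [PySem.List.len_eq]
            rw [singles_fold, hlen1, pair_fold]
            ring
  -- B equals the same sums via the frequency tables
  have hB : count_fillers_py_alt tokens = refS tokens + refP tokens := by
    unfold count_fillers_py_alt
    rw [PySem.List.slice_from_one]
    rw [PySem.List.foldl_add, PySem.List.foldl_add]
    have hfreq : (fillerWords.map
        (fun w => (tokens.foldl (fun d t => d.insert t (d.getD t 0 + 1)) PySem.Dict.empty).getD w 0)).sum
        = (fillerWords.map (fun w => (tokens.count w : Int))).sum := by
      apply congrArg
      apply List.map_congr_left
      intro w _
      rw [PySem.Dict.getD_foldl_insert_add_one]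
      simp
    have hbi : (fillerPhrases.map
        (fun p => ((tokens.zip tokens.tail).foldl (fun d q => d.insert q (d.getD q 0 + 1)) PySem.Dict.empty).getD p 0)).sum
        = (fillerPhrases.map (fun p => ((tokens.zip tokens.tail).count p : Int))).sum := by
      apply congrArg
      apply List.map_congr_left
      intro p _
      rw [PySem.Dict.getD_foldl_insert_add_one]
      simp
    rw [hfreq, hbi]
    rw [sum_count_eq fillerWords nodup_fillerWords tokens,
        sum_count_eq fillerPhrases nodup_fillerPhrases (tokens.zip tokens.tail),
        ← refS_eq_foldr, ← refP_eq_foldr]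
    ring
  rw [hA, hB]

-- ===== VERDICT (by name: the statement is the Claim_ definition above) =====
theorem count_fillers_py_spec : Claim_equal_count_fillers_py := by
  intro tokens _
  unfold Spec_count_fillers_py
  exact count_fillers_py_eq tokens
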